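-- pv_equiv track=rewrite | github.com/balvisio/kibitz | hooks/kibitz_hook_common.py | parse_directive
-- ===== SOURCE A (Python) =====
-- KIBITZ_DIRECTIVES = ("/mute", "/tee")
--
-- def parse_directive(text):
--     """Return (cleaned_text, directive) where directive is "mute", "tee", or "".
--
--     Directives must appear at the very end of the message, preceded by
--     whitespace or be the entire message — so `path/to/mute` or `/muted` don't
--     trigger. Match is case-sensitive."""
--     stripped = text.rstrip()
--     for token in KIBITZ_DIRECTIVES:
--         if stripped.endswith(token):
--             prefix = stripped[: -len(token)]
--             if not prefix or prefix[-1].isspace():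
--                 return prefix.rstrip(), token[1:]
--     return text, ""
-- ===== SOURCE B (Python) =====
-- KIBITZ_DIRECTIVES = ("/mute", "/tee")
--
-- def parse_directive(text):
--     stripped = text.rstrip()
--     parts = stripped.rsplit(None, 1)
--     if parts and parts[-1] in KIBITZ_DIRECTIVES:
--         return (parts[0] if len(parts) == 2 else ""), parts[-1][1:]
--     return text, ""
-- ===== Notes on version B (the rewrite author's own statement) =====
-- stated objective: idiomatic
-- what changed: B tokenizes: it peels off the last whitespace-delimited word with rsplit(None, 1) and tests it for membership in the directive tuple, replacing A's per-directive endswith loop with its suffix slicing and manual preceding-whitespace boundary check.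
import Mathlib
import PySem

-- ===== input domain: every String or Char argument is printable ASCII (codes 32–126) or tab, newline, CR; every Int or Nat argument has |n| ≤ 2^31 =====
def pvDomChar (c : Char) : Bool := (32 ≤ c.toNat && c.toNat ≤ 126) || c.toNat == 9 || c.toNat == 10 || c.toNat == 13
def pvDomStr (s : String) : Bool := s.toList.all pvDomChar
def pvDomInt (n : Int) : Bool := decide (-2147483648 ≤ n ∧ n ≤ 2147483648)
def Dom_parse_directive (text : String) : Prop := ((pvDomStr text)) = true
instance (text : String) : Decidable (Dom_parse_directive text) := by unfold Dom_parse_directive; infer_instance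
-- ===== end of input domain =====

-- B replaces A's per-directive endswith loop with one rsplit(None,1) tokenization plus a membership test (objective: idiomatic).

-- ===== PORT A =====
-- one loop iteration of A: directive check for a single token
-- (stripped[:-len(token)] = take (length - len token), exact since len token > 0;
--  prefix[-1] on nonempty prefix = getLast?)
def pvTryTok (stripped tok : List Char) : Option (List Char) :=
  if PySem.Chars.endswith stripped tok then
    let pre := stripped.take (stripped.length - tok.length)
    if pre = [] then some (PySem.Chars.rstrip pre)
    else
      match pre.getLast? with
      | some c => if PySem.Chars.isspace c then some (PySem.Chars.rstrip pre) else none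
      | none => none
  else none

def parse_directive (text : String) : String × String :=
  let stripped := PySem.Chars.rstrip text.toList
  match pvTryTok stripped "/mute".toList with
  | some p => (String.ofList p, "mute")
  | none =>
    match pvTryTok stripped "/tee".toList with
    | some p => (String.ofList p, "tee")
    | none => (text, "")

-- ===== PORT B =====
def pvNonspace (c : Char) : Bool := !PySem.Chars.isspace c

-- hand port of str.rsplit(None, 1) (no PySem primitive): strip trailing whitespace,
-- peel the maximal trailing non-space word, strip the separating whitespace run
def pvRsplitNone1 (s : List Char) : List (List Char) :=
  let r := s.reverse.dropWhile PySem.Chars.isspace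
  if r = [] then []
  else
    let w := r.takeWhile pvNonspace
    let rest := (r.dropWhile pvNonspace).dropWhile PySem.Chars.isspace
    if rest = [] then [w.reverse] else [rest.reverse, w.reverse]

def parse_directive_alt (text : String) : String × String :=
  let stripped := PySem.Chars.rstrip text.toList
  match pvRsplitNone1 stripped with
  | [w] =>
    if w = "/mute".toList || w = "/tee".toList then ("", String.ofList (w.drop 1)) else (text, "")
  | [p, w] =>
    if w = "/mute".toList || w = "/tee".toList then (String.ofList p, String.ofList (w.drop 1)) else (text, "")
  | _ => (text, "")

-- ===== PRECONDITION & SPEC =====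
def Spec_parse_directive (text : String) (out : String × String) : Prop := out = parse_directive_alt text
instance (text : String) (out : String × String) : Decidable (Spec_parse_directive text out) := by unfold Spec_parse_directive; infer_instance

-- ===== CLAIM (what is proved, stated in full; the proofs are below) =====
def Claim_equal_parse_directive : Prop := ∀ (text : String), Dom_parse_directive text → Spec_parse_directive text (parse_directive text)

-- ===== LEMMAS AND PROOFS =====

lemma pv_dropWhile_idem (p : Char → Bool) (l : List Char) :
    (l.dropWhile p).dropWhile p = l.dropWhile p := by
  induction l with
  | nil => simp
  | cons a l ih =>
    by_cases h : p a
    · rw [List.dropWhile_cons_of_pos h]; exact ih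
    · rw [List.dropWhile_cons_of_neg h, List.dropWhile_cons_of_neg h]

lemma pv_takeWhile_all (p : Char → Bool) (l : List Char) (h : ∀ x ∈ l, p x = true) :
    l.takeWhile p = l := by
  induction l with
  | nil => simp
  | cons a l ih =>
    rw [List.takeWhile_cons_of_pos (h a (by simp)), ih fun x hx => h x (by simp [hx])]

lemma pv_dropWhile_all (p : Char → Bool) (l : List Char) (h : ∀ x ∈ l, p x = true) :
    l.dropWhile p = [] := by
  induction l with
  | nil => simp
  | cons a l ih =>
    rw [List.dropWhile_cons_of_pos (h a (by simp))]; exact ih fun x hx => h x (by simp [hx])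

lemma pv_takeWhile_app (p : Char → Bool) (l1 l2 : List Char) (h : ∀ x ∈ l1, p x = true) :
    (l1 ++ l2).takeWhile p = l1 ++ l2.takeWhile p := by
  induction l1 with
  | nil => simp
  | cons a l ih =>
    rw [List.cons_append, List.takeWhile_cons_of_pos (h a (by simp)),
      ih fun x hx => h x (by simp [hx]), List.cons_append]

lemma pv_dropWhile_app (p : Char → Bool) (l1 l2 : List Char) (h : ∀ x ∈ l1, p x = true) :
    (l1 ++ l2).dropWhile p = l2.dropWhile p := by
  induction l1 with
  | nil => simp
  | cons a l ih =>
    rw [List.cons_append, List.dropWhile_cons_of_pos (h a (by simp))]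
    exact ih fun x hx => h x (by simp [hx])

lemma pv_tryTok_eq (s t : List Char)
    (hns : ∀ c ∈ t, PySem.Chars.isspace c = false) :
    pvTryTok s t =
      if s.reverse.takeWhile pvNonspace = t.reverse
      then some (((s.reverse.dropWhile pvNonspace).dropWhile PySem.Chars.isspace).reverse)
      else none := by
  have hnt : ∀ x ∈ t.reverse, pvNonspace x = true := by
    intro x hx; simp [pvNonspace, hns x (List.mem_reverse.mp hx)]
  by_cases he : PySem.Chars.endswith s t = true
  · obtain ⟨pre, hpre⟩ := (PySem.Chars.endswith_iff s t).mp he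
    subst hpre
    have htake : List.take ((pre ++ t).length - t.length) (pre ++ t) = pre := by
      have hlen : (pre ++ t).length - t.length = pre.length := by
        simp [List.length_append]
      rw [hlen]; exact List.take_left
    have hrev : (pre ++ t).reverse = t.reverse ++ pre.reverse := by simp
    rcases hp : pre.reverse with _ | ⟨c, tl⟩
    · -- pre = []: token is the whole (stripped) message in both programs
      have hpe : pre = [] := by simpa using congrArg List.reverse hp
      subst hpe
      have h1 : (([] : List Char) ++ t).reverse.takeWhile pvNonspace = t.reverse := by
        simp only [List.nil_append]
        exact pv_takeWhile_all _ _ hnt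
      have hdrop : (([] : List Char) ++ t).reverse.dropWhile pvNonspace = [] := by
        simp only [List.nil_append]
        exact pv_dropWhile_all _ _ hnt
      rw [if_pos h1, hdrop]
      simp only [List.nil_append] at he htake ⊢
      simp [pvTryTok, he, PySem.Chars.rstrip]
    · have hpe : pre ≠ [] := by
        intro h; rw [h] at hp; simp at hp
      have hlast : pre.getLast? = some c := by
        rw [← List.head?_reverse, hp]; rfl
      by_cases hc : PySem.Chars.isspace c = true
      · -- whitespace before the token: A fires; B's last word is exactly the token
        have hcn : pvNonspace c = false := by simp [pvNonspace, hc]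
        have h1 : (pre ++ t).reverse.takeWhile pvNonspace = t.reverse := by
          rw [hrev, hp, pv_takeWhile_app _ _ _ hnt, List.takeWhile_cons_of_neg (by simp [hcn]),
            List.append_nil]
        have hdw : (pre ++ t).reverse.dropWhile pvNonspace = pre.reverse := by
          rw [hrev, hp, pv_dropWhile_app _ _ _ hnt, List.dropWhile_cons_of_neg (by simp [hcn])]
        rw [if_pos h1, hdw]
        simp [pvTryTok, he, hpe, hlast, hc, PySem.Chars.rstrip]
      · -- token glued to a non-space char: A skips; B's last word is longer than the token
        have hcn : pvNonspace c = true := by simp [pvNonspace, hc]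
        have h1 : ¬ (pre ++ t).reverse.takeWhile pvNonspace = t.reverse := by
          rw [hrev, hp, pv_takeWhile_app _ _ _ hnt, List.takeWhile_cons_of_pos hcn]
          intro h
          have := congrArg List.length h
          simp [List.length_append] at this
        rw [if_neg h1]
        simp [pvTryTok, he, hpe, hlast, hc]
  · -- not a suffix of the stripped text: neither program matches this token
    have h1 : ¬ s.reverse.takeWhile pvNonspace = t.reverse := by
      intro h
      apply he
      rw [PySem.Chars.endswith_iff]
      have hpref : t.reverse <+: s.reverse := h ▸ List.takeWhile_prefix _
      obtain ⟨u, hu⟩ := hpref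
      exact ⟨u.reverse, by simpa using congrArg List.reverse hu⟩
    simp [pvTryTok, he, h1]

set_option maxRecDepth 4000 in
theorem parse_directive_spec : Claim_equal_parse_directive := by
  intro text _
  unfold Spec_parse_directive
  simp only [parse_directive, parse_directive_alt, pvRsplitNone1]
  have hmns : ∀ c ∈ "/mute".toList, PySem.Chars.isspace c = false := by
    rw [show "/mute".toList = ['/','m','u','t','e'] from by decide]
    intro c hc; fin_cases hc <;> decide
  have htns : ∀ c ∈ "/tee".toList, PySem.Chars.isspace c = false := by
    rw [show "/tee".toList = ['/','t','e','e'] from by decide]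
    intro c hc; fin_cases hc <;> decide
  rw [pv_tryTok_eq _ _ hmns, pv_tryTok_eq _ _ htns]
  set rev := (PySem.Chars.rstrip text.toList).reverse with hrevdef
  have hfix : rev.dropWhile PySem.Chars.isspace = rev := by
    rw [hrevdef]
    simp only [PySem.Chars.rstrip, List.reverse_reverse]
    exact pv_dropWhile_idem _ _
  rw [hfix]
  by_cases hm : rev.takeWhile pvNonspace = "/mute".toList.reverse
  · have hrne : rev ≠ [] := by
      intro h; rw [h] at hm; simp at hm
    have hw : (rev.takeWhile pvNonspace).reverse = "/mute".toList := by
      rw [hm]; simp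
    rw [if_pos hm, if_neg hrne]
    by_cases hrest : (rev.dropWhile pvNonspace).dropWhile PySem.Chars.isspace = []
    · rw [if_pos hrest, hrest]
      simp [hw]
    · rw [if_neg hrest]
      simp [hw]
  · by_cases ht : rev.takeWhile pvNonspace = "/tee".toList.reverse
    · have hrne : rev ≠ [] := by
        intro h; rw [h] at ht; simp at ht
      have hw : (rev.takeWhile pvNonspace).reverse = "/tee".toList := by
        rw [ht]; simp
      rw [if_neg hm, if_pos ht, if_neg hrne]
      by_cases hrest : (rev.dropWhile pvNonspace).dropWhile PySem.Chars.isspace = []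
      · rw [if_pos hrest, hrest]
        simp [hw]
      · rw [if_neg hrest]
        simp [hw]
    · -- no directive: both return (text, "")
      have hm2 : ¬ rev.takeWhile pvNonspace = ['e','t','u','m','/'] := by
        intro h; apply hm; rw [h]; decide
      have ht2 : ¬ rev.takeWhile pvNonspace = ['e','e','t','/'] := by
        intro h; apply ht; rw [h]; decide
      rw [if_neg hm, if_neg ht]
      by_cases hrne : rev = []
      · rw [if_pos hrne]
      · rw [if_neg hrne]
        have hwm' : ¬ (rev.takeWhile pvNonspace).reverse = "/mute".toList := by
          intro h; exact hm (by simpa using congrArg List.reverse h)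
        have hwt' : ¬ (rev.takeWhile pvNonspace).reverse = "/tee".toList := by
          intro h; exact ht (by simpa using congrArg List.reverse h)
        by_cases hrest : (rev.dropWhile pvNonspace).dropWhile PySem.Chars.isspace = []
        · rw [if_pos hrest]
          simp [hm2, ht2]
        · rw [if_neg hrest]
          simp [hm2, ht2]
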